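-- pv_equiv track=rewrite | github.com/abrahamchandy95/MockTxns | export/standard/external_accounts.py | _kind_and_category
-- ===== SOURCE A (Python) =====
-- _PREFIX_KIND_CATEGORY: tuple[tuple[str, str, str], ...] = (
--     ("XF", "family_external", "family"),
--     ("XGOV", "government_external", "government"),
--     ("XINS", "insurance_external", "insurance"),
--     ("XIRS", "tax_authority_external", "tax"),
--     ("XLND", "lender_external", "lending"),
--     ("XLI", "landlord_individual_external", "landlord_individual"),
--     ("XLS", "landlord_small_llc_external", "landlord_small_llc"),
--     ("XLC", "landlord_corporate_external", "landlord_corporate"),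
--     ("XL", "landlord_external", "landlord"),
--     ("XE", "employer_external", "employer"),
--     ("XBNK", "bank_servicing_external", "bank_servicing"),
-- )
--
-- def _kind_and_category(
--     account_id: str,
--     merchant_categories: dict[str, str],
-- ) -> tuple[str, str]:
--     merchant_category = merchant_categories.get(account_id)
--     if merchant_category is not None:
--         return "merchant_external", merchant_category
--
--     for prefix, kind, category in _PREFIX_KIND_CATEGORY:
--         if account_id.startswith(prefix):
--             return kind, category
--
--     return "external_account", "unknown"
-- ===== SOURCE B (Python) =====
-- _DEFAULT = ("external_account", "unknown")
--
--
-- def _kind_and_category(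
--     account_id: str,
--     merchant_categories: dict[str, str],
-- ) -> tuple[str, str]:
--     mc = merchant_categories.get(account_id)
--     if mc is not None:
--         return "merchant_external", mc
--
--     # Hard-coded decision tree on the characters of account_id (a two-level trie
--     # unrolled into nested conditionals); replaces the linear prefix-table scan.
--     s = account_id
--     if len(s) < 2 or s[0] != "X":
--         return _DEFAULT
--     c = s[1]
--     if c == "F":
--         return "family_external", "family"
--     if c == "E":
--         return "employer_external", "employer"
--     if c == "G":
--         if s[2:4] == "OV":
--             return "government_external", "government"
--         return _DEFAULT
--     if c == "B":
--         if s[2:4] == "NK":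
--             return "bank_servicing_external", "bank_servicing"
--         return _DEFAULT
--     if c == "I":
--         t = s[2:4]
--         if t == "NS":
--             return "insurance_external", "insurance"
--         if t == "RS":
--             return "tax_authority_external", "tax"
--         return _DEFAULT
--     if c == "L":
--         if s[2:4] == "ND":
--             return "lender_external", "lending"
--         d = s[2:3]
--         if d == "I":
--             return "landlord_individual_external", "landlord_individual"
--         if d == "S":
--             return "landlord_small_llc_external", "landlord_small_llc"
--         if d == "C":
--             return "landlord_corporate_external", "landlord_corporate"
--         return "landlord_external", "landlord"
--     return _DEFAULT
-- ===== Notes on version B (the rewrite author's own statement) =====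
-- stated objective: alternative
-- what changed: Replaces the ordered linear scan over the 11-entry prefix tuple with a hard-coded decision tree (an unrolled two-level character trie): branch on s[1] after checking s[0]=='X', then on a short slice s[2:4]/s[2:3], so each prefix character is inspected at most once instead of once per table row.
import Mathlib
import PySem

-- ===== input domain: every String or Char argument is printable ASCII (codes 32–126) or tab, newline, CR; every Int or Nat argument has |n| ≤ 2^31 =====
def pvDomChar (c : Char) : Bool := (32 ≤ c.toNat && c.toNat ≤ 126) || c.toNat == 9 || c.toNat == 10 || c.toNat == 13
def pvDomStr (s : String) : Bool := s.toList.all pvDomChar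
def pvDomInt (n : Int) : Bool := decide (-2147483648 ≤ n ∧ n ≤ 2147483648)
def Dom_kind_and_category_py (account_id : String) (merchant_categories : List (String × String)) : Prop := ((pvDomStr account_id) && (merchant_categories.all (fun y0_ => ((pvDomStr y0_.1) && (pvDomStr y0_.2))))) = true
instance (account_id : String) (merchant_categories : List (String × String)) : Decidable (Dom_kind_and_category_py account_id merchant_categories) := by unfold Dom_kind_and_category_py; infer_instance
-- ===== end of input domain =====

-- ===== PORT A =====
-- B replaces A's ordered linear scan over the prefix tuple by a hard-coded
-- decision tree on the first characters of account_id (an unrolled trie).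

-- _PREFIX_KIND_CATEGORY
def pvTableA : List (String × String × String) :=
  [("XF", "family_external", "family"),
   ("XGOV", "government_external", "government"),
   ("XINS", "insurance_external", "insurance"),
   ("XIRS", "tax_authority_external", "tax"),
   ("XLND", "lender_external", "lending"),
   ("XLI", "landlord_individual_external", "landlord_individual"),
   ("XLS", "landlord_small_llc_external", "landlord_small_llc"),
   ("XLC", "landlord_corporate_external", "landlord_corporate"),
   ("XL", "landlord_external", "landlord"),
   ("XE", "employer_external", "employer"),
   ("XBNK", "bank_servicing_external", "bank_servicing")]

-- the 'for prefix, kind, category in _PREFIX_KIND_CATEGORY' loop with its early return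
def pvScanA (account_id : String) : List (String × String × String) → String × String
  | [] => ("external_account", "unknown")
  | (pre, kind, category) :: rest =>
    if PySem.Str.startswith account_id pre then (kind, category)
    else pvScanA account_id rest

def kind_and_category_py (account_id : String) (merchant_categories : List (String × String)) : String × String :=
  match (PySem.Dict.mk merchant_categories).get? account_id with
  | some merchant_category => ("merchant_external", merchant_category)
  | none => pvScanA account_id pvTableA

-- ===== PORT B =====
-- _DEFAULT
def pvDefault : String × String := ("external_account", "unknown")

-- the nested-conditional decision tree of Source B (single-character Python strings
-- s[0], s[1], "F", … are ported as Chars: equality of 1-char strings = Char equality)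
def pvClassify (s : String) : String × String :=
  if PySem.Str.len s < 2 || !(PySem.Str.pyGet? s 0 == some 'X') then pvDefault
  else
    let c := PySem.Str.pyGet? s 1
    if c == some 'F' then ("family_external", "family")
    else if c == some 'E' then ("employer_external", "employer")
    else if c == some 'G' then
      (if PySem.Str.slice s (some 2) (some 4) == "OV" then
        ("government_external", "government") else pvDefault)
    else if c == some 'B' then
      (if PySem.Str.slice s (some 2) (some 4) == "NK" then
        ("bank_servicing_external", "bank_servicing") else pvDefault)
    else if c == some 'I' then
      (let t := PySem.Str.slice s (some 2) (some 4)
       if t == "NS" then ("insurance_external", "insurance")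
       else if t == "RS" then ("tax_authority_external", "tax")
       else pvDefault)
    else if c == some 'L' then
      (if PySem.Str.slice s (some 2) (some 4) == "ND" then ("lender_external", "lending")
       else
         let d := PySem.Str.slice s (some 2) (some 3)
         if d == "I" then ("landlord_individual_external", "landlord_individual")
         else if d == "S" then ("landlord_small_llc_external", "landlord_small_llc")
         else if d == "C" then ("landlord_corporate_external", "landlord_corporate")
         else ("landlord_external", "landlord"))
    else pvDefault

def kind_and_category_py_alt (account_id : String) (merchant_categories : List (String × String)) : String × String :=
  match (PySem.Dict.mk merchant_categories).get? account_id with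
  | some mc => ("merchant_external", mc)
  | none => pvClassify account_id

-- ===== PRECONDITION & SPEC =====
def Spec_kind_and_category_py (account_id : String) (merchant_categories : List (String × String)) (out : String × String) : Prop := out = kind_and_category_py_alt account_id merchant_categories
instance (account_id : String) (merchant_categories : List (String × String)) (out : String × String) : Decidable (Spec_kind_and_category_py account_id merchant_categories out) := by unfold Spec_kind_and_category_py; infer_instance

-- ===== CLAIM (what is proved, stated in full; the proofs are below) =====
def Claim_equal_kind_and_category_py : Prop := ∀ (account_id : String) (merchant_categories : List (String × String)), Dom_kind_and_category_py account_id merchant_categories → Spec_kind_and_category_py account_id merchant_categories (kind_and_category_py account_id merchant_categories)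

-- ===== LEMMAS AND PROOFS =====

set_option maxHeartbeats 2000000

lemma pvBeqOf (l : List Char) (t : String) : (String.ofList l == t) = (l == t.toList) := by
  apply Bool.eq_iff_iff.mpr; simp only [beq_iff_eq]
  constructor
  · rintro rfl; simp
  · intro h; rw [h, String.ofList_toList]

lemma pv_core_eq (a : String) : pvScanA a pvTableA = pvClassify a := by
  rw [← String.ofList_toList (s := a)]
  generalize a.toList = l
  simp only [String.toList_ofList, pvScanA, pvTableA, pvClassify, pvDefault, PySem.Str.startswith_eq,
    PySem.Str.len, PySem.Str.pyGet?, PySem.Str.slice,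
    PySem.Chars.pyGet?_eq_listPyGet?, PySem.Chars.slice_eq_listSlice, pvBeqOf]
  rcases l with _ | ⟨c0, _ | ⟨c1, _ | ⟨c2, _ | ⟨c3, r⟩⟩⟩⟩ <;>
    simp only [PySem.Chars.startswith, List.isPrefixOf,
      show ("XF" : String).toList = ['X','F'] from rfl,
      show ("XGOV" : String).toList = ['X','G','O','V'] from rfl,
      show ("XINS" : String).toList = ['X','I','N','S'] from rfl,
      show ("XIRS" : String).toList = ['X','I','R','S'] from rfl,
      show ("XLND" : String).toList = ['X','L','N','D'] from rfl,
      show ("XLI" : String).toList = ['X','L','I'] from rfl,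
      show ("XLS" : String).toList = ['X','L','S'] from rfl,
      show ("XLC" : String).toList = ['X','L','C'] from rfl,
      show ("XL" : String).toList = ['X','L'] from rfl,
      show ("XE" : String).toList = ['X','E'] from rfl,
      show ("XBNK" : String).toList = ['X','B','N','K'] from rfl,
      show ("OV" : String).toList = ['O','V'] from rfl,
      show ("NK" : String).toList = ['N','K'] from rfl,
      show ("NS" : String).toList = ['N','S'] from rfl,
      show ("RS" : String).toList = ['R','S'] from rfl,
      show ("ND" : String).toList = ['N','D'] from rfl,
      show ("I" : String).toList = ['I'] from rfl,
      show ("S" : String).toList = ['S'] from rfl,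
      show ("C" : String).toList = ['C'] from rfl]
  · -- empty string
    simp [PySem.List.pyGet?]
  · -- one character
    simp [PySem.List.pyGet?, PySem.List.pyIdx?]
  · -- two characters
    simp [PySem.List.pyGet?, PySem.List.pyIdx?, PySem.List.slice, PySem.List.clampIdx]
    try (split_ifs <;> simp_all [@eq_comm Char])
  · -- three characters
    simp [PySem.List.pyGet?, PySem.List.pyIdx?, PySem.List.slice, PySem.List.clampIdx]
    by_cases h0 : c0 = 'X'
    · subst h0
      simp only [true_and]
      by_cases hF : c1 = 'F'
      · subst hF; simp
      · by_cases hE : c1 = 'E'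
        · subst hE; simp
        · by_cases hG : c1 = 'G'
          · subst hG; simp
          · by_cases hB : c1 = 'B'
            · subst hB; simp
            · by_cases hI : c1 = 'I'
              · subst hI; simp
              · by_cases hL : c1 = 'L'
                · subst hL; simp; split_ifs <;> simp_all [@eq_comm Char]
                · simp_all [@eq_comm Char]
    · simp_all [@eq_comm Char]
  · -- four or more characters
    have h2 : (0:Int) ≤ ↑r.length + 1 + 1 := by positivity
    have h3 : (0:Int) ≤ ↑r.length + 1 + 1 + 1 := by positivity
    have hneg : ¬ ((↑r.length + 1 + 1 : Int) < 0) := by omega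
    simp only [PySem.List.pyGet?, PySem.List.pyIdx?, PySem.List.slice, PySem.List.clampIdx]
    simp [h2, h3, hneg]
    by_cases h0 : c0 = 'X'
    · subst h0
      simp only [true_and]
      by_cases hF : c1 = 'F'
      · subst hF; simp
      · by_cases hE : c1 = 'E'
        · subst hE; simp
        · by_cases hG : c1 = 'G'
          · subst hG; simp; try (split_ifs <;> simp_all [@eq_comm Char])
          · by_cases hB : c1 = 'B'
            · subst hB; simp; try (split_ifs <;> simp_all [@eq_comm Char])
            · by_cases hI : c1 = 'I'
              · subst hI; simp; try (split_ifs <;> simp_all [@eq_comm Char])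
              · by_cases hL : c1 = 'L'
                · subst hL; simp; try (split_ifs <;> simp_all [@eq_comm Char])
                · simp_all [@eq_comm Char]
    · simp_all [@eq_comm Char]

-- ===== VERDICT (by name: the statement is the Claim_ definition above) =====
theorem kind_and_category_py_spec : Claim_equal_kind_and_category_py := by
  intro a m _
  unfold Spec_kind_and_category_py kind_and_category_py kind_and_category_py_alt
  cases (PySem.Dict.mk m).get? a with
  | some v => rfl
  | none => simpa using pv_core_eq a
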